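-- pv_equiv track=rewrite | github.com/thehalleyyoung/synbio-verifier | implementation/bioprover/ai/feature_extraction.py | _count_feedback_loops
-- ===== SOURCE A (Python) =====
-- from typing import Any, Dict, List, Optional, Sequence, Set, Tuple
--
-- def _count_feedback_loops(adj: Dict[str, Set[str]], max_length: int = 6) -> int:
--     """Count elementary feedback loops up to *max_length* via DFS."""
--     nodes = list(adj.keys())
--     visited_global: Set[Tuple[str, ...]] = set()
--     count = 0
--     for start in nodes:
--         stack: List[Tuple[str, List[str]]] = [(start, [start])]
--         while stack:
--             current, path = stack.pop()
--             if len(path) > max_length: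
--                 continue
--             for nbr in adj.get(current, set()):
--                 if nbr == start and len(path) >= 2:
--                     canon = _canonical_cycle(path)
--                     if canon not in visited_global:
--                         visited_global.add(canon)
--                         count += 1
--                 elif nbr not in path and len(path) < max_length:
--                     stack.append((nbr, path + [nbr]))
--     return count
--
-- def _canonical_cycle(path: List[str]) -> Tuple[str, ...]:
--     """Return a rotation-invariant canonical form for a cycle."""
--     min_idx = path.index(min(path))
--     rotated = path[min_idx:] + path[:min_idx]
--     return tuple(rotated)
-- ===== SOURCE B (Python) =====
-- def _count_feedback_loops(adj, max_length=6):
--     """Count elementary feedback loops up to *max_length*.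
--
--     Each cycle is discovered exactly once, rooted at its lexicographically
--     smallest node: the DFS never descends into a node smaller than the start
--     node, so no rotation canonicalisation is needed."""
--     cycles = set()
--
--     def dfs(start, current, path):
--         for nbr in adj.get(current, ()):
--             if nbr == start and len(path) >= 2:
--                 cycles.add(tuple(path))
--             elif start < nbr and nbr not in path and len(path) < max_length:
--                 dfs(start, nbr, path + [nbr])
--
--     for start in adj:
--         dfs(start, start, [start])
--     return len(cycles)
-- ===== Notes on version B (the rewrite author's own statement) =====
-- stated objective: faster
-- what changed: B replaces A's explicit-stack DFS from every node with global rotation-canonicalisation dedup by a recursive DFS that roots each cycle at its lexicographically smallest node and prunes any step into a node smaller than the start, so each cycle is explored from one root only and no rotation canonical form is computed.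
import Mathlib
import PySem

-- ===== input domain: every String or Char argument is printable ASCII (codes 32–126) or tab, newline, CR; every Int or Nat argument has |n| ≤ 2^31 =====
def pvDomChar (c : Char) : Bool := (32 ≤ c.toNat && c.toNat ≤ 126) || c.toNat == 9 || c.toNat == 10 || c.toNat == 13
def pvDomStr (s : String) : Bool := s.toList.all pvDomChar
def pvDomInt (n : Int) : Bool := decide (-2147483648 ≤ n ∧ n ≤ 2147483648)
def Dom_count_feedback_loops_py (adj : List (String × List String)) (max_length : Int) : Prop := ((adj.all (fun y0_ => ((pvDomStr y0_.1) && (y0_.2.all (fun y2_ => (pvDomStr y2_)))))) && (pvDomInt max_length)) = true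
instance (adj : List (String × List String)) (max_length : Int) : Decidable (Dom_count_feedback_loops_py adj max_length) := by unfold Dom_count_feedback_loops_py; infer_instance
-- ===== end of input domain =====

-- B roots each elementary cycle at its smallest node with a pruned recursive DFS instead of
-- A's stack DFS from every node with rotation-canonicalisation dedup; measurably faster by a
-- constant factor (fewer path explorations), return value proved identical.

-- ===== PORT A =====
-- helper: _canonical_cycle
def pvCanon (path : List String) : List String :=
  match PySem.List.min? path (fun x => x) with
  | none => []
  | some m =>
    match PySem.List.index? path m with
    | none => []
    | some i =>
        PySem.List.slice path (some (i : Int)) none ++ PySem.List.slice path none (some (i : Int))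

-- one iteration of A's inner `for nbr in adj.get(current, set())` body
def pvStepA (start : String) (path : List String) (M : Int)
    (acc : PySem.Set (List String) × Int × List (String × List String)) (nbr : String) :
    PySem.Set (List String) × Int × List (String × List String) :=
  if nbr = start ∧ 2 ≤ path.length then
    if pvCanon path ∈ acc.1 then acc
    else (PySem.Set.add acc.1 (pvCanon path), acc.2.1 + 1, acc.2.2)
  else if nbr ∉ path ∧ (path.length : Int) < M then
    (acc.1, acc.2.1, (nbr, path ++ [nbr]) :: acc.2.2)
  else acc

-- termination measure for A's while-loop over the explicit stack
def pvWt (Mn Bd : Nat) (p : List String) : Nat := Bd ^ (Mn + 1 - p.length)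
def pvMsr (Mn Bd : Nat) (st : List (String × List String)) : Nat :=
  (st.map (fun cp => pvWt Mn Bd cp.2)).sum
def pvBd (d : PySem.Dict String (List String)) : Nat :=
  (d.items.map (fun kv => kv.2.length)).sum + 2

lemma pvGetD_len_le (d : PySem.Dict String (List String)) (c : String) :
    (PySem.Dict.getD d c []).length + 2 ≤ pvBd d := by
  unfold pvBd
  cases h : PySem.Dict.get? d c with
  | none => simp [PySem.Dict.getD, h]
  | some v =>
      have hm := PySem.Dict.mem_items_of_get?_eq_some d h
      have : v.length ∈ d.items.map (fun kv => kv.2.length) := by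
        exact List.mem_map.mpr ⟨(c, v), hm, rfl⟩
      have := List.le_sum_of_mem (by exact_mod_cast this)
      simp [PySem.Dict.getD, h]
      omega

lemma pvStepA_msr (Mn Bd : Nat) (start : String) (path : List String) (M : Int)
    (acc : PySem.Set (List String) × Int × List (String × List String)) (nbr : String) :
    pvMsr Mn Bd (pvStepA start path M acc nbr).2.2
      ≤ Bd ^ (Mn - path.length) + pvMsr Mn Bd acc.2.2 := by
  unfold pvStepA
  split_ifs <;>
    simp only [pvMsr, pvWt, List.map_cons, List.sum_cons, List.length_append,
      List.length_cons, List.length_nil]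
  all_goals try omega
  all_goals rw [show Mn + 1 - (path.length + 1) = Mn - path.length by omega]

lemma pvFoldA_msr (Mn Bd : Nat) (start : String) (path : List String) (M : Int) :
    ∀ (nbrs : List String) (acc : PySem.Set (List String) × Int × List (String × List String)),
    pvMsr Mn Bd ((nbrs.foldl (pvStepA start path M) acc)).2.2
      ≤ nbrs.length * Bd ^ (Mn - path.length) + pvMsr Mn Bd acc.2.2 := by
  intro nbrs
  induction nbrs with
  | nil => intro acc; simp
  | cons n rest ih =>
      intro acc
      have h1 := ih (pvStepA start path M acc n)
      have h2 := pvStepA_msr Mn Bd start path M acc n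
      simp only [List.foldl_cons, List.length_cons]
      calc pvMsr Mn Bd ((rest.foldl (pvStepA start path M) (pvStepA start path M acc n))).2.2
          ≤ rest.length * Bd ^ (Mn - path.length) + pvMsr Mn Bd (pvStepA start path M acc n).2.2 := h1
        _ ≤ rest.length * Bd ^ (Mn - path.length) + (Bd ^ (Mn - path.length) + pvMsr Mn Bd acc.2.2) := by omega
        _ = (rest.length + 1) * Bd ^ (Mn - path.length) + pvMsr Mn Bd acc.2.2 := by ring

-- A's inner while-loop (explicit stack, top = head)
def pvLoopA (d : PySem.Dict String (List String)) (M : Int) (start : String) :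
    List (String × List String) → PySem.Set (List String) × Int → PySem.Set (List String) × Int
  | [], vc => vc
  | (current, path) :: rest, vc =>
    if (path.length : Int) > M then pvLoopA d M start rest vc
    else
      let r := (PySem.Dict.getD d current []).foldl (pvStepA start path M) (vc.1, vc.2, rest)
      pvLoopA d M start r.2.2 (r.1, r.2.1)
termination_by st _ => pvMsr M.toNat (pvBd d) st
decreasing_by
  · simp only [pvMsr, List.map_cons, List.sum_cons]
    have : 1 ≤ pvWt M.toNat (pvBd d) path := Nat.one_le_pow _ _ (by unfold pvBd; omega)
    omega
  · rename_i hle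
    have hfold := pvFoldA_msr M.toNat (pvBd d) start path M (PySem.Dict.getD d current []) (vc.1, vc.2, rest)
    have hlen : (PySem.Dict.getD d current []).length + 2 ≤ pvBd d := pvGetD_len_le d current
    have hL : path.length ≤ M.toNat := by omega
    have hpow : (PySem.Dict.getD d current []).length * pvBd d ^ (M.toNat - path.length)
        < pvBd d ^ (M.toNat + 1 - path.length) := by
      have he : M.toNat + 1 - path.length = (M.toNat - path.length) + 1 := by omega
      rw [he, pow_succ]
      have hpos : 0 < pvBd d ^ (M.toNat - path.length) := Nat.pow_pos (by unfold pvBd; omega)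
      calc (PySem.Dict.getD d current []).length * pvBd d ^ (M.toNat - path.length)
          < pvBd d * pvBd d ^ (M.toNat - path.length) :=
            (Nat.mul_lt_mul_right hpos).mpr (by omega)
        _ = pvBd d ^ (M.toNat - path.length) * pvBd d := by ring
    simp only [pvMsr, pvWt, List.map_cons, List.sum_cons] at hfold ⊢
    omega

-- port of A: _count_feedback_loops
def count_feedback_loops_py (adj : List (String × List String)) (max_length : Int) : Int :=
  let d := PySem.Dict.ofList adj
  let nodes := PySem.Dict.keys d
  (nodes.foldl (fun vc start => pvLoopA d max_length start [(start, [start])] vc)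
    (PySem.Set.empty, 0)).2

-- ===== PORT B =====
def pvDfsB (d : PySem.Dict String (List String)) (M : Int) (start : String) :
    List String → List String → PySem.Set (List String) → PySem.Set (List String)
  | _, [], acc => acc
  | path, nbr :: rest, acc =>
    if nbr = start ∧ 2 ≤ path.length then
      pvDfsB d M start path rest (PySem.Set.add acc path)
    else if start < nbr ∧ nbr ∉ path ∧ (path.length : Int) < M then
      pvDfsB d M start path rest
        (pvDfsB d M start (path ++ [nbr]) (PySem.Dict.getD d nbr []) acc)
    else pvDfsB d M start path rest acc
termination_by path nbrs _ => (M.toNat + 1 - path.length, nbrs.length)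
decreasing_by
  all_goals first
    | (apply Prod.Lex.left; simp only [List.length_append, List.length_singleton]; omega)
    | (apply Prod.Lex.right; simp)

def count_feedback_loops_py_alt (adj : List (String × List String)) (max_length : Int) : Int :=
  let d := PySem.Dict.ofList adj
  ((PySem.Dict.keys d).foldl
    (fun acc start => pvDfsB d max_length start [start] (PySem.Dict.getD d start []) acc)
    PySem.Set.empty).length

-- ===== PRECONDITION & SPEC =====
def Spec_count_feedback_loops_py (adj : List (String × List String)) (max_length : Int) (out : Int) : Prop := out = count_feedback_loops_py_alt adj max_length
instance (adj : List (String × List String)) (max_length : Int) (out : Int) : Decidable (Spec_count_feedback_loops_py adj max_length out) := by unfold Spec_count_feedback_loops_py; infer_instance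

-- ===== CLAIM (what is proved, stated in full; the proofs are below) =====
def Claim_equal_count_feedback_loops_py : Prop := ∀ (adj : List (String × List String)) (max_length : Int), Dom_count_feedback_loops_py adj max_length → Spec_count_feedback_loops_py adj max_length (count_feedback_loops_py adj max_length)

-- ===== LEMMAS AND PROOFS =====

-- edge relation of the graph (v is a neighbour of u)
def pvE (d : PySem.Dict String (List String)) (u v : String) : Prop :=
  v ∈ PySem.Dict.getD d u []

-- q is an elementary cycle path of length in [2, M] starting at s
def pvIsCyc (d : PySem.Dict String (List String)) (M : Int) (s : String) (q : List String) : Prop :=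
  q.head? = some s ∧ List.IsChain (pvE d) q ∧ (∃ t, q.getLast? = some t ∧ pvE d t s) ∧
  q.Nodup ∧ 2 ≤ q.length ∧ (q.length : Int) ≤ M

-- invariant of A's stack entries
def pvInvA (d : PySem.Dict String (List String)) (start : String)
    (cp : String × List String) : Prop :=
  cp.2 ≠ [] ∧ cp.2.head? = some start ∧ List.IsChain (pvE d) cp.2 ∧ cp.2.Nodup ∧
  cp.2.getLast? = some cp.1


lemma pvSetAdd_new {v : PySem.Set (List String)} {x : List String} (hx : x ∉ v) :
    PySem.Set.add v x = v ++ [x] := by simp [PySem.Set.add, hx]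


lemma pvStepA_visited (start : String) (path : List String) (M : Int)
    (acc : PySem.Set (List String) × Int × List (String × List String)) (n : String)
    (x : List String) :
    x ∈ (pvStepA start path M acc n).1 ↔
      x ∈ acc.1 ∨ (n = start ∧ 2 ≤ path.length ∧ x = pvCanon path) := by
  unfold pvStepA
  split_ifs with h1 h2 h3 <;> try dsimp only
  · constructor
    · exact Or.inl
    · rintro (h | ⟨_, _, rfl⟩)
      · exact h
      · exact h2
  · simp only [PySem.Set.mem_add]
    constructor
    · rintro (h | rfl)
      · exact Or.inl h
      · exact Or.inr ⟨h1.1, h1.2, rfl⟩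
    · rintro (h | ⟨_, _, rfl⟩)
      · exact Or.inl h
      · exact Or.inr rfl
  · constructor
    · exact Or.inl
    · rintro (h | ⟨ha, hb, _⟩)
      · exact h
      · exact absurd ⟨ha, hb⟩ h1
  · constructor
    · exact Or.inl
    · rintro (h | ⟨ha, hb, _⟩)
      · exact h
      · exact absurd ⟨ha, hb⟩ h1

lemma pvStepA_stack (start : String) (path : List String) (M : Int)
    (acc : PySem.Set (List String) × Int × List (String × List String)) (n : String)
    (cp : String × List String) :
    cp ∈ (pvStepA start path M acc n).2.2 ↔
      cp ∈ acc.2.2 ∨ (¬(n = start ∧ 2 ≤ path.length) ∧ n ∉ path ∧ (path.length : Int) < M ∧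
        cp = (n, path ++ [n])) := by
  unfold pvStepA
  split_ifs with h1 h2 h3 <;> try dsimp only
  · simp [h1]
  · simp [h1]
  · simp only [List.mem_cons]
    constructor
    · rintro (rfl | h)
      · exact Or.inr ⟨h1, h3.1, h3.2, rfl⟩
      · exact Or.inl h
    · rintro (h | ⟨_, _, _, rfl⟩)
      · exact Or.inr h
      · exact Or.inl rfl
  · constructor
    · exact Or.inl
    · rintro (h | ⟨_, hb, hc, _⟩)
      · exact h
      · exact absurd ⟨hb, hc⟩ h3

lemma pvStepA_cnt (start : String) (path : List String) (M : Int)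
    (acc : PySem.Set (List String) × Int × List (String × List String)) (n : String)
    (h : acc.1.Nodup) :
    (pvStepA start path M acc n).1.Nodup ∧
    (pvStepA start path M acc n).2.1 - acc.2.1 =
      ((pvStepA start path M acc n).1.length : Int) - acc.1.length := by
  unfold pvStepA
  split_ifs with h1 h2 h3 <;> try dsimp only
  · exact ⟨h, by omega⟩
  · rw [pvSetAdd_new h2]
    constructor
    · simp only [List.nodup_append, List.nodup_cons, List.nodup_nil, and_true, true_and,
        List.not_mem_nil, not_false_iff]
      refine ⟨h, ?_⟩
      intro a ha b hb
      rcases List.mem_singleton.mp hb with rfl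
      exact fun e => h2 (e ▸ ha)
    · simp only [List.length_append, List.length_cons, List.length_nil]
      push_cast
      omega
  · exact ⟨h, by omega⟩
  · exact ⟨h, by omega⟩

lemma pvFoldA_visited (start : String) (path : List String) (M : Int) :
    ∀ (nbrs : List String) (acc : PySem.Set (List String) × Int × List (String × List String))
      (x : List String),
    x ∈ (nbrs.foldl (pvStepA start path M) acc).1 ↔
      x ∈ acc.1 ∨ (start ∈ nbrs ∧ 2 ≤ path.length ∧ x = pvCanon path) := by
  intro nbrs
  induction nbrs with
  | nil => intro acc x; simp
  | cons n rest ih =>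
      intro acc x
      simp only [List.foldl_cons]
      rw [ih, pvStepA_visited]
      simp only [List.mem_cons, eq_comm (a := start) (b := n)]
      tauto

lemma pvFoldA_stack (start : String) (path : List String) (M : Int) :
    ∀ (nbrs : List String) (acc : PySem.Set (List String) × Int × List (String × List String))
      (cp : String × List String),
    cp ∈ (nbrs.foldl (pvStepA start path M) acc).2.2 ↔
      cp ∈ acc.2.2 ∨ ∃ n, n ∈ nbrs ∧ ¬(n = start ∧ 2 ≤ path.length) ∧ n ∉ path ∧
        (path.length : Int) < M ∧ cp = (n, path ++ [n]) := by
  intro nbrs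
  induction nbrs with
  | nil => intro acc cp; simp
  | cons n rest ih =>
      intro acc cp
      simp only [List.foldl_cons]
      rw [ih, pvStepA_stack]
      constructor
      · rintro ((h | ⟨ha, hb, hc, rfl⟩) | ⟨m, hm, hrest⟩)
        · exact Or.inl h
        · exact Or.inr ⟨n, List.mem_cons_self .., ha, hb, hc, rfl⟩
        · exact Or.inr ⟨m, List.mem_cons_of_mem _ hm, hrest⟩
      · rintro (h | ⟨m, hm, hrest⟩)
        · exact Or.inl (Or.inl h)
        · rcases List.mem_cons.mp hm with rfl | hm'
          · exact Or.inl (Or.inr ⟨hrest.1, hrest.2.1, hrest.2.2⟩)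
          · exact Or.inr ⟨m, hm', hrest⟩

lemma pvFoldA_cnt (start : String) (path : List String) (M : Int) :
    ∀ (nbrs : List String) (acc : PySem.Set (List String) × Int × List (String × List String)),
    acc.1.Nodup →
    (nbrs.foldl (pvStepA start path M) acc).1.Nodup ∧
    (nbrs.foldl (pvStepA start path M) acc).2.1 - acc.2.1 =
      ((nbrs.foldl (pvStepA start path M) acc).1.length : Int) - acc.1.length := by
  intro nbrs
  induction nbrs with
  | nil => intro acc h; simp only [List.foldl_nil]; exact ⟨h, by omega⟩
  | cons n rest ih =>
      intro acc h
      have hs := pvStepA_cnt start path M acc n h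
      have hr := ih (pvStepA start path M acc n) hs.1
      simp only [List.foldl_cons]
      exact ⟨hr.1, by omega⟩

lemma pvKeyOfEdge (d : PySem.Dict String (List String)) (u v : String) (h : pvE d u v) :
    u ∈ PySem.Dict.keys d := by
  unfold pvE PySem.Dict.getD at h
  cases hg : PySem.Dict.get? d u with
  | none => rw [hg] at h; simp at h
  | some w =>
      have hc : PySem.Dict.contains d u = true := by
        rw [PySem.Dict.contains_eq_isSome_get?, hg]; rfl
      exact (PySem.Dict.contains_iff_mem_keys d u).mp hc

lemma pvLoopA_cnt (d : PySem.Dict String (List String)) (M : Int) (start : String) :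
    ∀ (st : List (String × List String)) (vc : PySem.Set (List String) × Int),
    vc.1.Nodup →
    (pvLoopA d M start st vc).1.Nodup ∧
    (pvLoopA d M start st vc).2 - vc.2 =
      ((pvLoopA d M start st vc).1.length : Int) - vc.1.length := by
  intro st vc
  fun_induction pvLoopA d M start st vc with
  | case1 vc => intro h; exact ⟨h, by omega⟩
  | case2 current path rest vc hgt ih => intro h; exact ih h
  | case3 current path rest vc hgt r ih =>
      intro h
      have hr : r = (PySem.Dict.getD d current []).foldl (pvStepA start path M)
          (vc.1, vc.2, rest) := rfl
      have hf := pvFoldA_cnt start path M (PySem.Dict.getD d current []) (vc.1, vc.2, rest) h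
      rw [← hr] at hf
      have := ih hf.1
      exact ⟨this.1, by dsimp only at hf this ⊢; omega⟩

lemma pvCruxA (d : PySem.Dict String (List String)) (M : Int) (start current : String)
    (path : List String) (hinv : pvInvA d start (current, path))
    (hM : (path.length : Int) ≤ M) (x : List String) :
    ((start ∈ PySem.Dict.getD d current [] ∧ 2 ≤ path.length ∧ x = pvCanon path) ∨
      (∃ n, n ∈ PySem.Dict.getD d current [] ∧ ¬(n = start ∧ 2 ≤ path.length) ∧ n ∉ path ∧
        (path.length : Int) < M ∧
        ∃ q, (path ++ [n]) <+: q ∧ pvIsCyc d M start q ∧ x = pvCanon q)) ↔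
    (∃ q, path <+: q ∧ pvIsCyc d M start q ∧ x = pvCanon q) := by
  obtain ⟨hne, hhd, hch, hnd, hlast⟩ := hinv
  constructor
  · rintro (⟨hs, hl, he⟩ | ⟨n, hn, hns, hnp, hlM, q, hpre, hcyc, he⟩)
    · exact ⟨path, List.prefix_refl _, ⟨hhd, hch, ⟨current, hlast, hs⟩, hnd, hl, hM⟩, he⟩
    · exact ⟨q, (List.prefix_append path [n]).trans hpre, hcyc, he⟩
  · rintro ⟨q, ⟨t, rfl⟩, hcyc, he⟩
    cases t with
    | nil =>
        left
        obtain ⟨hh, hc, ⟨t0, hl0, hE⟩, hnd', hlen2, hlenM⟩ := hcyc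
        simp only [List.append_nil] at hl0 hE hlen2 he hh hc hnd' ⊢
        rw [hlast] at hl0
        obtain rfl : current = t0 := by injection hl0
        exact ⟨hE, hlen2, he⟩
    | cons n r =>
        right
        obtain ⟨hh, hc, hlast', hnd', hlen2, hlenM⟩ := hcyc
        have hdisj : ∀ a ∈ path, a ∈ n :: r → False := by
          intro a ha hb
          exact (List.nodup_append.mp hnd').2.2 a ha a hb rfl
        have hnmem : n ∈ PySem.Dict.getD d current [] :=
          (List.isChain_append.mp hc).2.2 current (by simp [hlast]) n rfl
        have hstartp : start ∈ path := by
          cases path with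
          | nil => exact absurd rfl hne
          | cons p0 ps =>
              have : p0 = start := by simpa using hh
              simp [this]
        refine ⟨n, hnmem, ?_, ?_, ?_, path ++ n :: r, ⟨r, by simp⟩,
          ⟨hh, hc, hlast', hnd', hlen2, hlenM⟩, he⟩
        · rintro ⟨rfl, -⟩
          exact hdisj n hstartp (List.mem_cons_self ..)
        · exact fun hm => hdisj n hm (List.mem_cons_self ..)
        · simp only [List.length_append, List.length_cons] at hlenM
          push_cast at hlenM ⊢
          omega

lemma pvLoopA_mem (d : PySem.Dict String (List String)) (M : Int) (start : String) :
    ∀ (st : List (String × List String)) (vc : PySem.Set (List String) × Int),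
    (∀ cp ∈ st, pvInvA d start cp) → ∀ (x : List String),
    x ∈ (pvLoopA d M start st vc).1 ↔
      x ∈ vc.1 ∨ ∃ cp ∈ st, ∃ q, cp.2 <+: q ∧ pvIsCyc d M start q ∧ x = pvCanon q := by
  intro st vc
  fun_induction pvLoopA d M start st vc with
  | case1 vc => intro _ x; simp
  | case2 current path rest vc hgt ih =>
      intro hinv x
      rw [ih (fun cp h => hinv cp (List.mem_cons_of_mem _ h)) x]
      constructor
      · rintro (h | ⟨cp, hcp, hP⟩)
        · exact Or.inl h
        · exact Or.inr ⟨cp, List.mem_cons_of_mem _ hcp, hP⟩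
      · rintro (h | ⟨cp, hcp, q, hpre, hcyc, he⟩)
        · exact Or.inl h
        · rcases List.mem_cons.mp hcp with rfl | h'
          · exfalso
            have h1 := hpre.length_le
            have h2 := hcyc.2.2.2.2.2
            have h3 : (path.length : Int) ≤ q.length := by exact_mod_cast h1
            omega
          · exact Or.inr ⟨cp, h', q, hpre, hcyc, he⟩
  | case3 current path rest vc hle r ih =>
      intro hinv x
      obtain ⟨hne, hhd, hch, hnd, hlast⟩ := hinv (current, path) (List.mem_cons_self ..)
      have hrestinv : ∀ cp ∈ rest, pvInvA d start cp :=
        fun cp h => hinv cp (List.mem_cons_of_mem _ h)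
      have hr : r = (PySem.Dict.getD d current []).foldl (pvStepA start path M)
          (vc.1, vc.2, rest) := rfl
      have hM : (path.length : Int) ≤ M := by omega
      have hcrux := pvCruxA d M start current path ⟨hne, hhd, hch, hnd, hlast⟩ hM
      have hv : ∀ y, y ∈ r.1 ↔ y ∈ vc.1 ∨
          (start ∈ PySem.Dict.getD d current [] ∧ 2 ≤ path.length ∧ y = pvCanon path) :=
        fun y => by rw [hr]; exact pvFoldA_visited start path M _ _ y
      have hst : ∀ cp, cp ∈ r.2.2 ↔ cp ∈ rest ∨ ∃ n, n ∈ PySem.Dict.getD d current [] ∧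
          ¬(n = start ∧ 2 ≤ path.length) ∧ n ∉ path ∧ (path.length : Int) < M ∧
          cp = (n, path ++ [n]) :=
        fun cp => by rw [hr]; exact pvFoldA_stack start path M _ _ cp
      have hinv' : ∀ cp ∈ r.2.2, pvInvA d start cp := by
        intro cp hcp
        rcases (hst cp).mp hcp with h | ⟨n, hn, hns, hnp, hlM, rfl⟩
        · exact hrestinv cp h
        · refine ⟨by simp, ?_, ?_, ?_, ?_⟩
          · cases path with
            | nil => exact absurd rfl hne
            | cons p0 ps => simpa using hhd
          · refine List.isChain_append.mpr ⟨hch, by simp, ?_⟩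
            intro a ha b hb
            simp only [List.head?_cons, Option.mem_def, Option.some.injEq] at hb
            rw [hlast] at ha
            simp only [Option.mem_def, Option.some.injEq] at ha
            subst ha; subst hb
            exact hn
          · refine List.nodup_append.mpr ⟨hnd, by simp, ?_⟩
            intro a ha b hb
            simp only [List.mem_singleton] at hb
            subst hb
            exact fun e => hnp (e ▸ ha)
          · exact List.getLast?_concat
      rw [ih hinv' x]
      constructor
      · rintro (hx | ⟨cp, hcp, hP⟩)
        · rcases (hv x).mp hx with h | hA
          · exact Or.inl h
          · exact Or.inr ⟨(current, path), List.mem_cons_self .., (hcrux x).mp (Or.inl hA)⟩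
        · rcases (hst cp).mp hcp with h | ⟨n, hn, hns, hnp, hlM, rfl⟩
          · exact Or.inr ⟨cp, List.mem_cons_of_mem _ h, hP⟩
          · exact Or.inr ⟨(current, path), List.mem_cons_self ..,
              (hcrux x).mp (Or.inr ⟨n, hn, hns, hnp, hlM, hP⟩)⟩
      · rintro (hx | ⟨cp, hcp, hP⟩)
        · exact Or.inl ((hv x).mpr (Or.inl hx))
        · rcases List.mem_cons.mp hcp with heq | hcp'
          · rcases (hcrux x).mpr (by rw [heq] at hP; exact hP) with hA | ⟨n, hn, hns, hnp, hlM, hq⟩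
            · exact Or.inl ((hv x).mpr (Or.inr hA))
            · exact Or.inr ⟨(n, path ++ [n]),
                (hst _).mpr (Or.inr ⟨n, hn, hns, hnp, hlM, rfl⟩), hq⟩
          · exact Or.inr ⟨cp, (hst cp).mpr (Or.inl hcp'), hP⟩


lemma pvAFold_mem (d : PySem.Dict String (List String)) (M : Int) :
    ∀ (ks : List String) (vc : PySem.Set (List String) × Int) (x : List String),
    x ∈ ((ks.foldl (fun vc s => pvLoopA d M s [(s, [s])] vc) vc)).1 ↔
      x ∈ vc.1 ∨ ∃ s ∈ ks, ∃ q, pvIsCyc d M s q ∧ x = pvCanon q := by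
  intro ks
  induction ks with
  | nil => intro vc x; simp
  | cons s ks ih =>
      intro vc x
      simp only [List.foldl_cons]
      rw [ih]
      have hinv : ∀ cp ∈ [(s, [s])], pvInvA d s cp := by
        intro cp hcp
        simp only [List.mem_singleton] at hcp
        subst hcp
        exact ⟨by simp, rfl, by simp, by simp, rfl⟩
      rw [pvLoopA_mem d M s [(s, [s])] vc hinv x]
      have hone : (∃ cp ∈ [(s, [s])], ∃ q, cp.2 <+: q ∧ pvIsCyc d M s q ∧ x = pvCanon q) ↔
          (∃ q, pvIsCyc d M s q ∧ x = pvCanon q) := by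
        constructor
        · rintro ⟨cp, hcp, q, _, hcyc, he⟩
          exact ⟨q, hcyc, he⟩
        · rintro ⟨q, hcyc, he⟩
          refine ⟨(s, [s]), List.mem_singleton.mpr rfl, q, ?_, hcyc, he⟩
          obtain ⟨hh, -⟩ := hcyc
          cases q with
          | nil => simp at hh
          | cons q0 t =>
              obtain rfl : q0 = s := by simpa using hh
              exact ⟨t, rfl⟩
      rw [hone]
      simp only [List.mem_cons]
      constructor
      · rintro ((h | h) | h)
        · exact Or.inl h
        · exact Or.inr ⟨s, Or.inl rfl, h⟩
        · obtain ⟨s', hs', hq⟩ := h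
          exact Or.inr ⟨s', Or.inr hs', hq⟩
      · rintro (h | ⟨s', hs' | hs', hq⟩)
        · exact Or.inl (Or.inl h)
        · subst hs'; exact Or.inl (Or.inr hq)
        · exact Or.inr ⟨s', hs', hq⟩

lemma pvAFold_cnt (d : PySem.Dict String (List String)) (M : Int) :
    ∀ (ks : List String) (vc : PySem.Set (List String) × Int),
    vc.1.Nodup →
    ((ks.foldl (fun vc s => pvLoopA d M s [(s, [s])] vc) vc)).1.Nodup ∧
    ((ks.foldl (fun vc s => pvLoopA d M s [(s, [s])] vc) vc)).2 - vc.2 =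
      (((ks.foldl (fun vc s => pvLoopA d M s [(s, [s])] vc) vc)).1.length : Int) - vc.1.length := by
  intro ks
  induction ks with
  | nil => intro vc h; simp only [List.foldl_nil]; exact ⟨h, by omega⟩
  | cons s ks ih =>
      intro vc h
      have h1 := pvLoopA_cnt d M s [(s, [s])] vc h
      have h2 := ih (pvLoopA d M s [(s, [s])] vc) h1.1
      simp only [List.foldl_cons]
      exact ⟨h2.1, by omega⟩

lemma pvDfsB_mem (d : PySem.Dict String (List String)) (M : Int) (start : String) :
    ∀ (path nbrs : List String) (acc : PySem.Set (List String)),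
    ∀ (hne : path ≠ []), path.head? = some start → List.IsChain (pvE d) path → path.Nodup →
    (∀ y ∈ path.drop 1, start < y) → (path.length = 1 ∨ (path.length : Int) ≤ M) →
    (∀ n ∈ nbrs, pvE d (path.getLast hne) n) →
    ∀ x, x ∈ pvDfsB d M start path nbrs acc ↔
      x ∈ acc ∨ (pvIsCyc d M start x ∧ (∀ y ∈ x.drop 1, start < y) ∧
        ((x = path ∧ start ∈ nbrs) ∨ ∃ n r, x = path ++ n :: r ∧ n ∈ nbrs)) := by
  intro path nbrs acc
  fun_induction pvDfsB d M start path nbrs acc with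
  | case1 path acc =>
      intro hne _ _ _ _ _ _ x
      simp
  | case2 path nbr rest acc hbr ih =>
      intro hne hhd hch hnd htm hlen hnb x
      obtain ⟨hbs, hl2⟩ := hbr
      have hM : (path.length : Int) ≤ M := by
        rcases hlen with h | h
        · omega
        · exact h
      have hcycp : pvIsCyc d M start path :=
        ⟨hhd, hch, ⟨path.getLast hne, List.getLast?_eq_some_getLast hne,
          hnb start (hbs ▸ List.mem_cons_self ..)⟩, hnd, hl2, hM⟩
      rw [ih hne hhd hch hnd htm hlen (fun n hn => hnb n (List.mem_cons_of_mem _ hn)) x]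
      rw [PySem.Set.mem_add]
      constructor
      · rintro ((hx | rfl) | ⟨hcyc, htm', hsh⟩)
        · exact Or.inl hx
        · exact Or.inr ⟨hcycp, htm, Or.inl ⟨rfl, hbs ▸ List.mem_cons_self ..⟩⟩
        · refine Or.inr ⟨hcyc, htm', ?_⟩
          rcases hsh with ⟨rfl, hs⟩ | ⟨n, r, rfl, hn⟩
          · exact Or.inl ⟨rfl, List.mem_cons_of_mem _ hs⟩
          · exact Or.inr ⟨n, r, rfl, List.mem_cons_of_mem _ hn⟩
      · rintro (hx | ⟨hcyc, htm', hsh⟩)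
        · exact Or.inl (Or.inl hx)
        · rcases hsh with ⟨rfl, hs⟩ | ⟨n, r, rfl, hn⟩
          · rcases List.mem_cons.mp hs with heq | hs'
            · exact Or.inl (Or.inr rfl)
            · exact Or.inr ⟨hcyc, htm', Or.inl ⟨rfl, hs'⟩⟩
          · rcases List.mem_cons.mp hn with rfl | hn'
            · exfalso
              have hmem : n ∈ (path ++ n :: r).drop 1 := by
                cases path with
                | nil => exact absurd rfl hne
                | cons p0 ps => simp
              have hlt := htm' n hmem
              rw [hbs] at hlt
              exact lt_irrefl _ hlt
            · exact Or.inr ⟨hcyc, htm', Or.inr ⟨n, r, rfl, hn'⟩⟩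
  | case3 path nbr rest acc hbr1 hbr2 ih1 ih2 =>
      intro hne hhd hch hnd htm hlen hnb x
      obtain ⟨hlt, hnp, hltM⟩ := hbr2
      have hne' : path ++ [nbr] ≠ [] := by simp
      have hhd' : (path ++ [nbr]).head? = some start := by
        cases path with
        | nil => exact absurd rfl hne
        | cons p0 ps => simpa using hhd
      have hlast' : (path ++ [nbr]).getLast hne' = nbr := List.getLast_concat
      have hch' : List.IsChain (pvE d) (path ++ [nbr]) := by
        refine List.isChain_append.mpr ⟨hch, by simp, ?_⟩
        intro a ha b hb
        simp only [List.head?_cons, Option.mem_def, Option.some.injEq] at hb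
        rw [List.getLast?_eq_some_getLast hne] at ha
        simp only [Option.mem_def, Option.some.injEq] at ha
        subst hb
        subst ha
        exact hnb nbr (List.mem_cons_self ..)
      have hnd' : (path ++ [nbr]).Nodup := by
        refine List.nodup_append.mpr ⟨hnd, by simp, ?_⟩
        intro a ha b hb
        simp only [List.mem_singleton] at hb
        subst hb
        exact fun e => hnp (e ▸ ha)
      have htm' : ∀ y ∈ (path ++ [nbr]).drop 1, start < y := by
        intro y hy
        cases path with
        | nil => exact absurd rfl hne
        | cons p0 ps =>
            simp only [List.cons_append, List.drop_succ_cons, List.drop_zero] at hy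
            rcases List.mem_append.mp hy with h | h
            · exact htm y (by simp [h])
            · simp only [List.mem_singleton] at h
              subst h
              exact hlt
      have hlen' : (path ++ [nbr]).length = 1 ∨ ((path ++ [nbr]).length : Int) ≤ M := by
        right
        simp only [List.length_append, List.length_cons, List.length_nil]
        push_cast
        omega
      have hnb' : ∀ n ∈ PySem.Dict.getD d nbr [], pvE d ((path ++ [nbr]).getLast hne') n := by
        intro n hn
        rw [hlast']
        exact hn
      rw [ih2 hne hhd hch hnd htm hlen (fun n hn => hnb n (List.mem_cons_of_mem _ hn)) x]
      rw [ih1 hne' hhd' hch' hnd' htm' hlen' hnb' x]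
      constructor
      · rintro ((hx | ⟨hcyc, htmx, hsh⟩) | ⟨hcyc, htmx, hsh⟩)
        · exact Or.inl hx
        · refine Or.inr ⟨hcyc, htmx, Or.inr ?_⟩
          rcases hsh with ⟨rfl, hs⟩ | ⟨n, r, rfl, hn⟩
          · exact ⟨nbr, [], rfl, List.mem_cons_self ..⟩
          · exact ⟨nbr, n :: r, by simp, List.mem_cons_self ..⟩
        · refine Or.inr ⟨hcyc, htmx, ?_⟩
          rcases hsh with ⟨rfl, hs⟩ | ⟨n, r, rfl, hn⟩
          · exact Or.inl ⟨rfl, List.mem_cons_of_mem _ hs⟩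
          · exact Or.inr ⟨n, r, rfl, List.mem_cons_of_mem _ hn⟩
      · rintro (hx | ⟨hcyc, htmx, hsh⟩)
        · exact Or.inl (Or.inl hx)
        · rcases hsh with ⟨rfl, hs⟩ | ⟨n, r, rfl, hn⟩
          · rcases List.mem_cons.mp hs with heq | hs'
            · exfalso
              rw [heq] at hlt
              exact lt_irrefl _ hlt
            · exact Or.inr ⟨hcyc, htmx, Or.inl ⟨rfl, hs'⟩⟩
          · rcases List.mem_cons.mp hn with rfl | hn'
            · left
              right
              refine ⟨hcyc, htmx, ?_⟩
              cases r with
              | nil =>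
                  left
                  refine ⟨by simp, ?_⟩
                  obtain ⟨-, -, ⟨t, hlq, hE⟩, -, -, -⟩ := hcyc
                  rw [List.getLast?_concat] at hlq
                  obtain rfl : t = n := by injection hlq.symm
                  exact hE
              | cons r0 rs =>
                  right
                  refine ⟨r0, rs, by simp, ?_⟩
                  obtain ⟨-, hc, -, -, -, -⟩ := hcyc
                  have hc2 : List.IsChain (pvE d) ((path ++ [n]) ++ r0 :: rs) := by
                    simpa using hc
                  exact (List.isChain_append.mp hc2).2.2 n (by simp) r0 rfl
            · exact Or.inr ⟨hcyc, htmx, Or.inr ⟨n, r, rfl, hn'⟩⟩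
  | case4 path nbr rest acc hbr1 hbr2 ih =>
      intro hne hhd hch hnd htm hlen hnb x
      rw [ih hne hhd hch hnd htm hlen (fun n hn => hnb n (List.mem_cons_of_mem _ hn)) x]
      constructor
      · rintro (hx | ⟨hcyc, htmx, hsh⟩)
        · exact Or.inl hx
        · refine Or.inr ⟨hcyc, htmx, ?_⟩
          rcases hsh with ⟨rfl, hs⟩ | ⟨n, r, rfl, hn⟩
          · exact Or.inl ⟨rfl, List.mem_cons_of_mem _ hs⟩
          · exact Or.inr ⟨n, r, rfl, List.mem_cons_of_mem _ hn⟩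
      · rintro (hx | ⟨hcyc, htmx, hsh⟩)
        · exact Or.inl hx
        · refine Or.inr ⟨hcyc, htmx, ?_⟩
          rcases hsh with ⟨rfl, hs⟩ | ⟨n, r, rfl, hn⟩
          · rcases List.mem_cons.mp hs with heq | hs'
            · exact absurd ⟨heq.symm, hcyc.2.2.2.2.1⟩ hbr1
            · exact Or.inl ⟨rfl, hs'⟩
          · rcases List.mem_cons.mp hn with rfl | hn'
            · exfalso
              apply hbr2
              refine ⟨?_, ?_, ?_⟩
              · apply htmx n
                cases path with
                | nil => exact absurd rfl hne
                | cons p0 ps => simp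
              · obtain ⟨-, -, -, hndx, -, -⟩ := hcyc
                intro hmem
                exact (List.nodup_append.mp hndx).2.2 n hmem n (List.mem_cons_self ..) rfl
              · obtain ⟨-, -, -, -, -, hlM⟩ := hcyc
                simp only [List.length_append, List.length_cons] at hlM
                push_cast at hlM ⊢
                omega
            · exact Or.inr ⟨n, r, rfl, hn'⟩

lemma pvDfsB_nodup (d : PySem.Dict String (List String)) (M : Int) (start : String) :
    ∀ (path nbrs : List String) (acc : PySem.Set (List String)),
    acc.Nodup → (pvDfsB d M start path nbrs acc).Nodup := by
  intro path nbrs acc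
  fun_induction pvDfsB d M start path nbrs acc with
  | case1 path acc => exact id
  | case2 path nbr rest acc hbr ih =>
      intro h
      exact ih (PySem.Set.nodup_add _ _ h)
  | case3 path nbr rest acc hbr1 hbr2 ih1 ih2 =>
      intro h
      exact ih2 (ih1 h)
  | case4 path nbr rest acc hbr1 hbr2 ih =>
      intro h
      exact ih h

lemma pvFirstEdge (d : PySem.Dict String (List String)) (M : Int) (s : String) (x : List String)
    (hcyc : pvIsCyc d M s x) : ∃ n r, x = s :: n :: r ∧ pvE d s n := by
  obtain ⟨hh, hc, -, -, hl2, -⟩ := hcyc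
  cases x with
  | nil => simp at hh
  | cons x0 t =>
      obtain rfl : x0 = s := by simpa using hh
      cases t with
      | nil => simp at hl2
      | cons n r =>
          rcases (List.isChain_cons_iff _ _ _).mp hc with h | ⟨b, l', hR, -, heq⟩
          · simp at h
          · injection heq with h1 h2
            subst h1
            subst h2
            exact ⟨n, r, rfl, hR⟩

lemma pvDfsBTop_mem (d : PySem.Dict String (List String)) (M : Int) (s : String)
    (acc : PySem.Set (List String)) (x : List String) :
    x ∈ pvDfsB d M s [s] (PySem.Dict.getD d s []) acc ↔
      x ∈ acc ∨ (pvIsCyc d M s x ∧ ∀ y ∈ x.drop 1, s < y) := by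
  rw [pvDfsB_mem d M s [s] (PySem.Dict.getD d s []) acc (by simp) rfl (by simp) (by simp)
    (by simp) (Or.inl rfl) (by intro n hn; simpa using hn) x]
  constructor
  · rintro (hx | ⟨hcyc, htmx, -⟩)
    · exact Or.inl hx
    · exact Or.inr ⟨hcyc, htmx⟩
  · rintro (hx | ⟨hcyc, htmx⟩)
    · exact Or.inl hx
    · refine Or.inr ⟨hcyc, htmx, ?_⟩
      obtain ⟨n, r, rfl, hE⟩ := pvFirstEdge d M s x hcyc
      exact Or.inr ⟨n, r, rfl, hE⟩

lemma pvBFold_mem (d : PySem.Dict String (List String)) (M : Int) :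
    ∀ (ks : List String) (acc : PySem.Set (List String)) (x : List String),
    x ∈ ks.foldl (fun acc s => pvDfsB d M s [s] (PySem.Dict.getD d s []) acc) acc ↔
      x ∈ acc ∨ ∃ s ∈ ks, pvIsCyc d M s x ∧ ∀ y ∈ x.drop 1, s < y := by
  intro ks
  induction ks with
  | nil => intro acc x; simp
  | cons s ks ih =>
      intro acc x
      simp only [List.foldl_cons]
      rw [ih, pvDfsBTop_mem]
      simp only [List.mem_cons]
      constructor
      · rintro ((h | h) | ⟨s', hs', hq⟩)
        · exact Or.inl h
        · exact Or.inr ⟨s, Or.inl rfl, h⟩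
        · exact Or.inr ⟨s', Or.inr hs', hq⟩
      · rintro (h | ⟨s', hs' | hs', hq⟩)
        · exact Or.inl (Or.inl h)
        · subst hs'
          exact Or.inl (Or.inr hq)
        · exact Or.inr ⟨s', hs', hq⟩

lemma pvBFold_nodup (d : PySem.Dict String (List String)) (M : Int) :
    ∀ (ks : List String) (acc : PySem.Set (List String)),
    acc.Nodup →
    (ks.foldl (fun acc s => pvDfsB d M s [s] (PySem.Dict.getD d s []) acc) acc).Nodup := by
  intro ks
  induction ks with
  | nil => exact fun acc h => h
  | cons s ks ih =>
      intro acc h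
      simp only [List.foldl_cons]
      exact ih _ (pvDfsB_nodup d M s [s] (PySem.Dict.getD d s []) acc h)

lemma pvCanon_rotate (path : List String) (m : String) (i : Nat)
    (hm : PySem.List.min? path (fun x => x) = some m)
    (hi : PySem.List.index? path m = some i) :
    pvCanon path = path.drop i ++ path.take i := by
  simp only [pvCanon, hm, hi]
  rw [PySem.List.slice_from_natCast, PySem.List.slice_to_natCast]

lemma pvCanon_minHead (s : String) (t : List String) (hmin : ∀ y ∈ t, s < y) :
    pvCanon (s :: t) = s :: t := by
  cases hm : PySem.List.min? (s :: t) (fun x => x) with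
  | none =>
      rw [PySem.List.min?_eq_none_iff] at hm
      simp at hm
  | some m =>
      have hmem := PySem.List.min?_mem hm
      have hle := PySem.List.min?_isMin hm
      have hms : m = s := by
        have h1 : m ≤ s := by simpa using hle s (List.mem_cons_self ..)
        rcases List.mem_cons.mp hmem with h | h
        · exact h
        · exact absurd h1 (not_le.mpr (hmin m h))
      rw [pvCanon_rotate (s :: t) m 0 hm (by rw [hms]; exact PySem.List.index?_cons_self ..)]
      simp

lemma pvTailMin (m : String) (t : List String) (hnd : (m :: t).Nodup) (hmin : ∀ y ∈ m :: t, m ≤ y) :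
    ∀ y ∈ (m :: t).drop 1, m < y := by
  intro y hy
  simp only [List.drop_succ_cons, List.drop_zero] at hy
  have h1 := hmin y (List.mem_cons_of_mem _ hy)
  have h2 : y ≠ m := fun e => ((List.nodup_cons.mp hnd).1 (e ▸ hy))
  exact lt_of_le_of_ne h1 (Ne.symm h2)

lemma pvRotChain (d : PySem.Dict String (List String)) (x y : String) (a' b' : List String)
    (hc : List.IsChain (pvE d) ((x :: a') ++ y :: b'))
    (hw : pvE d ((y :: b').getLast (by simp)) x) :
    List.IsChain (pvE d) ((y :: b') ++ x :: a') ∧ pvE d ((x :: a').getLast (by simp)) y := by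
  obtain ⟨h1, h2, h3⟩ := List.isChain_append.mp hc
  refine ⟨List.isChain_append.mpr ⟨h2, h1, ?_⟩, ?_⟩
  · intro a ha b hb
    rw [List.getLast?_eq_some_getLast (by simp)] at ha
    simp only [List.head?_cons, Option.mem_def, Option.some.injEq] at ha hb
    subst ha
    subst hb
    exact hw
  · exact h3 _ (by rw [List.getLast?_eq_some_getLast (by simp)]; rfl) y rfl

lemma pvBridge (d : PySem.Dict String (List String)) (M : Int) (x : List String) :
    (∃ s ∈ PySem.Dict.keys d, ∃ q, pvIsCyc d M s q ∧ x = pvCanon q) ↔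
      (∃ s ∈ PySem.Dict.keys d, pvIsCyc d M s x ∧ ∀ y ∈ x.drop 1, s < y) := by
  constructor
  · rintro ⟨s, hs, q, hcyc, rfl⟩
    obtain ⟨hh, hc, ⟨t0, hql, hE⟩, hnd, hl2, hlM⟩ := hcyc
    cases hm : PySem.List.min? q (fun z => z) with
    | none =>
        rw [PySem.List.min?_eq_none_iff] at hm
        rw [hm] at hl2
        simp at hl2
    | some m =>
        have hmem := PySem.List.min?_mem hm
        have hmin : ∀ y ∈ q, m ≤ y := fun y hy => by simpa using PySem.List.min?_isMin hm y hy
        obtain ⟨i, hi⟩ : ∃ i, PySem.List.index? q m = some i := by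
          cases h : PySem.List.index? q m with
          | none =>
              rw [PySem.List.index?_eq_none_iff] at h
              exact absurd hmem h
          | some i => exact ⟨i, rfl⟩
        obtain ⟨hilt, hqi, -⟩ := PySem.List.getElem_of_index?_eq_some hi
        rw [pvCanon_rotate q m i hm hi]
        by_cases hz : i = 0
        · subst hz
          simp only [List.drop_zero, List.take_zero, List.append_nil]
          refine ⟨s, hs, ⟨hh, hc, ⟨t0, hql, hE⟩, hnd, hl2, hlM⟩, ?_⟩
          cases q with
          | nil => simp at hl2
          | cons q0 tq =>
              have hq0s : q0 = s := by simpa using hh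
              have hq0m : q0 = m := by simpa using hqi
              subst hq0m
              intro y hy
              have := pvTailMin q0 tq hnd hmin y (by simpa using hy)
              rw [← hq0s]
              exact this
        · obtain ⟨a0, as, ha⟩ : ∃ a0 as, q.take i = a0 :: as := by
            cases ht : q.take i with
            | nil =>
                exfalso
                have := congrArg List.length ht
                simp only [List.length_take, List.length_nil] at this
                omega
            | cons a0 as => exact ⟨a0, as, rfl⟩
          obtain ⟨b0, bs, hb⟩ : ∃ b0 bs, q.drop i = b0 :: bs := by
            cases ht : q.drop i with
            | nil =>
                exfalso
                have := congrArg List.length ht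
                simp only [List.length_drop, List.length_nil] at this
                omega
            | cons b0 bs => exact ⟨b0, bs, rfl⟩
          have hq' : q = (a0 :: as) ++ (b0 :: bs) := by rw [← ha, ← hb, List.take_append_drop]
          have hb0 : b0 = m := by
            have h1 : (q.drop i).head? = q[i]? := List.head?_drop
            rw [hb, List.getElem?_eq_getElem hilt, hqi] at h1
            simpa using h1
          subst hb0
          have ha0 : a0 = s := by
            rw [hq'] at hh
            simpa using hh
          have ht0 : t0 = (b0 :: bs).getLast (by simp) := by
            rw [hq', List.getLast?_append, List.getLast?_eq_some_getLast (l := b0 :: bs) (by simp)]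
              at hql
            simpa using hql.symm
          have hw : pvE d ((b0 :: bs).getLast (by simp)) a0 := by
            rw [ha0, ← ht0]
            exact hE
          have hcq : List.IsChain (pvE d) ((a0 :: as) ++ b0 :: bs) := hq' ▸ hc
          obtain ⟨hch2, hlast2⟩ := pvRotChain d a0 b0 as bs hcq hw
          rw [hb, ha]
          have hperm : ((b0 :: bs) ++ (a0 :: as)).Perm q := by
            rw [hq']
            exact List.perm_append_comm
          have hndx : ((b0 :: bs) ++ (a0 :: as)).Nodup := (hperm.nodup_iff).mpr hnd
          have hminx : ∀ y ∈ (b0 :: bs) ++ (a0 :: as), b0 ≤ y :=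
            fun y hy => hmin y (hperm.subset hy)
          have hkm : b0 ∈ PySem.Dict.keys d := by
            have h2 : List.IsChain (pvE d) (b0 :: (bs ++ a0 :: as)) := by
              rw [← List.cons_append]
              exact hch2
            rcases (List.isChain_cons_iff _ _ _).mp h2 with hnil | ⟨bb, ll, hR, -, -⟩
            · simp at hnil
            · exact pvKeyOfEdge d b0 bb hR
          refine ⟨b0, hkm, ⟨?_, hch2, ⟨(a0 :: as).getLast (by simp), ?_, ?_⟩, hndx, ?_, ?_⟩, ?_⟩
          · simp
          · rw [List.getLast?_append, List.getLast?_eq_some_getLast (l := a0 :: as) (by simp)]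
            rfl
          · exact hlast2
          · rw [hperm.length_eq]
            exact hl2
          · rw [hperm.length_eq]
            exact hlM
          · intro y hy
            have h1 : y ∈ (b0 :: (bs ++ a0 :: as)).drop 1 := by
              rw [← List.cons_append]
              exact hy
            exact pvTailMin b0 (bs ++ a0 :: as)
              (by rw [← List.cons_append]; exact hndx)
              (by rw [← List.cons_append]; exact hminx) y h1
  · rintro ⟨s, hs, hcyc, htm⟩
    refine ⟨s, hs, x, hcyc, ?_⟩
    obtain ⟨hh, -, -, -, -, -⟩ := hcyc
    cases x with
    | nil => simp at hh
    | cons x0 t =>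
        obtain rfl : x0 = s := by simpa using hh
        exact (pvCanon_minHead x0 t (fun y hy => htm y (by simpa using hy))).symm

lemma pvFinal (d : PySem.Dict String (List String)) (M : Int) :
    (((PySem.Dict.keys d).foldl (fun vc start => pvLoopA d M start [(start, [start])] vc)
      (PySem.Set.empty, 0)).2 : Int) =
    ((((PySem.Dict.keys d).foldl
      (fun acc start => pvDfsB d M start [start] (PySem.Dict.getD d start []) acc)
      PySem.Set.empty).length : Int)) := by
  have hA := pvAFold_cnt d M (PySem.Dict.keys d) (PySem.Set.empty, 0) List.nodup_nil
  have hB := pvBFold_nodup d M (PySem.Dict.keys d) PySem.Set.empty List.nodup_nil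
  have hmem : ∀ x, x ∈ ((PySem.Dict.keys d).foldl
      (fun vc start => pvLoopA d M start [(start, [start])] vc) (PySem.Set.empty, 0)).1 ↔
      x ∈ (PySem.Dict.keys d).foldl
      (fun acc start => pvDfsB d M start [start] (PySem.Dict.getD d start []) acc)
      PySem.Set.empty := by
    intro x
    rw [pvAFold_mem d M, pvBFold_mem d M]
    have h0 : x ∈ (PySem.Set.empty : PySem.Set (List String)) ↔ False := by
      simp [PySem.Set.empty]
    rw [h0]
    simp only [false_or]
    exact pvBridge d M x
  have hperm := (List.perm_ext_iff_of_nodup hA.1 hB).mpr hmem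
  have hlen := hperm.length_eq
  have h2 := hA.2
  rw [hlen] at h2
  simp only [PySem.Set.empty, List.length_nil] at h2 ⊢
  omega

-- ===== VERDICT (by name: the statement is the Claim_ definition above) =====
theorem count_feedback_loops_py_spec : Claim_equal_count_feedback_loops_py := by
  intro adj M _
  unfold Spec_count_feedback_loops_py
  have e1 : count_feedback_loops_py adj M =
      (((PySem.Dict.keys (PySem.Dict.ofList adj)).foldl
        (fun vc start => pvLoopA (PySem.Dict.ofList adj) M start [(start, [start])] vc)
        (PySem.Set.empty, 0)).2 : Int) := rfl
  have e2 : count_feedback_loops_py_alt adj M =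
      ((((PySem.Dict.keys (PySem.Dict.ofList adj)).foldl
        (fun acc start => pvDfsB (PySem.Dict.ofList adj) M start [start]
          (PySem.Dict.getD (PySem.Dict.ofList adj) start []) acc)
        PySem.Set.empty).length : Int)) := rfl
  rw [e1, e2]
  exact pvFinal (PySem.Dict.ofList adj) M
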